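-- pv_equiv track=rewrite | github.com/google-deepmind/conformal_training | sorting_nets.py | generate_list_bitonic
-- ===== SOURCE A (Python) =====
-- def parallelize(snet_lst):
--   """Organize comparators that can be run in parallel in stages.
--
--   We visit each comparator in the sequence and try to place it
--   to the earliest stage by starting from the last stage constructed.
--
--   Args:
--     snet_lst: List of sorting network stages (that are lists of edges)
--   Returns:
--     stage: Rearanged comparators as stages
--   """
--
--   stage_sets = [set()]
--   stage = [[]]
--   for edge_lst in snet_lst:
--     for edge in edge_lst:
--       placed = False
--       place_here = len(stage)-1
--       for stage_idx in reversed(range(len(stage))):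
--         if ((edge[0] not in stage_sets[stage_idx])
--             and (edge[1] not in stage_sets[stage_idx])):
--           place_here = stage_idx
--           placed = True
--         else:
--           break
--       if not placed:
--         stage.append([edge])
--         stage_sets.append(set(edge))
--       else:
--         stage[place_here].append(edge)
--         stage_sets[place_here].update(edge)
--   return stage
--
-- def generate_list_bitonic(length, make_parallel=True):
--   """Generate a Bitonic sorting network list of arbitrary length.
--
--   Args:
--     length: Number of wires
--     make_parallel: Flag to organize parallel executable comparators into stages
--   Returns:
--     snet_list: list of pairwise swaps
--
--   """
--   def greatest_power_of_two_less_than(n):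
--     k = 1
--     while k > 0 and k < n:
--       k = k * 2
--     return k // 2
--
--   def bitonic_sort(lo, n, direction):
--     if n > 1:
--       m = n // 2
--       bitonic_sort(lo, m, not direction)
--       bitonic_sort(lo+m, n-m, direction)
--       bitonic_merge(lo, n, direction)
--
--   def bitonic_merge(lo, n, direction):
--     if n > 1:
--       m = greatest_power_of_two_less_than(n)
--       for i in range(lo, lo+n-m):
--         if direction:
--           snet_list.append([[i, i+m]])
--         else:
--           snet_list.append([[i+m, i]])
--       bitonic_merge(lo, m, direction)
--       bitonic_merge(lo+m, n-m, direction)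
--
--   snet_list = []
--   bitonic_sort(0, length, True)
--   return parallelize(snet_list) if make_parallel else snet_list
-- ===== SOURCE B (Python) =====
-- def generate_list_bitonic(length, make_parallel=True):
--   """Bitonic sorting network; parallelize via a last-stage-per-wire dict."""
--
--   def gp2(n):
--     # largest power of two strictly less than n (n > 1)
--     k = 1
--     while 2 * k < n:
--       k = 2 * k
--     return k
--
--   def merge_edges(lo, n, direction):
--     if n <= 1:
--       return []
--     m = gp2(n)
--     head = [[i, i + m] if direction else [i + m, i] for i in range(lo, lo + n - m)]
--     return head + merge_edges(lo, m, direction) + merge_edges(lo + m, n - m, direction)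
--
--   def sort_edges(lo, n, direction):
--     if n <= 1:
--       return []
--     m = n // 2
--     return (sort_edges(lo, m, not direction)
--             + sort_edges(lo + m, n - m, direction)
--             + merge_edges(lo, n, direction))
--
--   edges = sort_edges(0, length, True)
--   if not make_parallel:
--     return [[e] for e in edges]
--   stages = [[]]
--   last = {}
--   for edge in edges:
--     a, b = edge
--     p = max(last.get(a, -1), last.get(b, -1)) + 1
--     if p == len(stages):
--       stages.append([edge])
--     else:
--       stages[p].append(edge)
--     last[a] = p
--     last[b] = p
--   return stages
-- ===== Notes on version B (the rewrite author's own statement) =====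
-- stated objective: alternative
-- what changed: B builds the comparator list by pure recursive concatenation instead of appending singleton stages to a shared accumulator, and replaces parallelize's backward rescan of stage sets per comparator with a one-pass placement at max(last_stage[a], last_stage[b]) + 1 using a dict of the last stage used per wire.
import Mathlib
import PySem

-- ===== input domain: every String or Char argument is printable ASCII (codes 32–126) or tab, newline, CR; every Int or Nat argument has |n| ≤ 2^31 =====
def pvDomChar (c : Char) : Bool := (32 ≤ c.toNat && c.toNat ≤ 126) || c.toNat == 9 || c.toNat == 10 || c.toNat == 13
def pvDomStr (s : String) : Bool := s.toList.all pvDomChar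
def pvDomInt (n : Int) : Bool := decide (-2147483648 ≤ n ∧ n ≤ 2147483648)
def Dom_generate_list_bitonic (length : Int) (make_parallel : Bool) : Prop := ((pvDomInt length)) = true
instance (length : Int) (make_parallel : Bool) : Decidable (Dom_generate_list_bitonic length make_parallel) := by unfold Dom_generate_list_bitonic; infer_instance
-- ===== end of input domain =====

-- B replaces A's backward-scan parallelize (rescans stage sets per comparator) with a
-- one-pass placement keyed by a last-used-stage dict, and builds the comparator list by
-- pure concatenation instead of threading an accumulator.

-- ===== PORT A =====

-- greatest_power_of_two_less_than: k = 1; while k > 0 and k < n: k = k * 2; return k // 2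
def gptAuxA (n k : Int) : Int :=
  if 0 < k ∧ k < n then gptAuxA n (2 * k) else PySem.Int.floordiv k 2
termination_by (n - k).toNat
decreasing_by omega

def gptA (n : Int) : Int := gptAuxA n 1

-- bounds of the helper, cited by the ports' termination proofs
theorem gptAuxA_bounds (n : Int) :
    ∀ (k : Int), 0 < k → k < n → 1 ≤ gptAuxA n k ∧ gptAuxA n k < n := by
  intro k
  induction k using gptAuxA.induct (n := n) with
  | case1 k h ih =>
    intro _ _
    rw [gptAuxA, if_pos h]
    by_cases h2 : 2 * k < n
    · exact ih (by omega) h2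
    · rw [gptAuxA, if_neg (by omega)]
      rw [PySem.Int.floordiv_eq_ediv_of_pos (by omega)]
      omega
  | case2 k h =>
    intro h0 h1
    exact absurd ⟨h0, h1⟩ h

theorem gptA_bounds (n : Int) (h : 1 < n) : 1 ≤ gptA n ∧ gptA n < n :=
  gptAuxA_bounds n 1 one_pos h

-- bitonic_merge, appending to the snet_list accumulator exactly as A does (m = gptA n inlined)
def mergeA (lo n : Int) (dir : Bool) (acc : List (List (List Int))) : List (List (List Int)) :=
  if h : 1 < n then
    mergeA (lo + gptA n) (n - gptA n) dir
      (mergeA lo (gptA n) dir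
        ((PySem.List.pyRange lo (lo + n - gptA n)).foldl
          (fun a i => a ++ [if dir then [[i, i + gptA n]] else [[i + gptA n, i]]]) acc))
  else acc
termination_by n.toNat
decreasing_by
  · have := gptA_bounds n h; omega
  · have := gptA_bounds n h; omega

-- bitonic_sort (m = n // 2 inlined)
def sortA (lo n : Int) (dir : Bool) (acc : List (List (List Int))) : List (List (List Int)) :=
  if h : 1 < n then
    mergeA lo n dir
      (sortA (lo + PySem.Int.floordiv n 2) (n - PySem.Int.floordiv n 2) dir
        (sortA lo (PySem.Int.floordiv n 2) (!dir) acc))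
  else acc
termination_by n.toNat
decreasing_by
  · rw [PySem.Int.floordiv_eq_ediv_of_pos (by omega)]; omega
  · rw [PySem.Int.floordiv_eq_ediv_of_pos (by omega)]; omega

-- the inner 'for stage_idx in reversed(range(len(stage)))' loop of parallelize, with its break
def scanGoA (sets : List (PySem.Set Int)) (a b : Int) : List Int → Int × Bool → Int × Bool
  | [], st => st
  | i :: rest, (p, pl) =>
    -- sets[i]: the index is always in range when parallelize calls this (len(stage_sets) = len(stage))
    if !(PySem.Set.contains (PySem.List.pyGetD sets i PySem.Set.empty) a)
        && !(PySem.Set.contains (PySem.List.pyGetD sets i PySem.Set.empty) b) then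
      scanGoA sets a b rest (i, true)
    else (p, pl)

-- the body of parallelize's 'for edge in edge_lst' loop
def stepA (st : List (List (List Int)) × List (PySem.Set Int)) (edge : List Int) :
    List (List (List Int)) × List (PySem.Set Int) :=
  match edge with
  | a :: b :: _ =>
    let r := scanGoA st.2 a b ((PySem.List.pyRange 0 (st.1.length : Int)).reverse)
      ((st.1.length : Int) - 1, false)
    if !r.2 then (st.1 ++ [[edge]], st.2 ++ [PySem.Set.ofList edge])
    else (st.1.modify r.1.toNat (· ++ [edge]),
          st.2.modify r.1.toNat (fun s => PySem.Set.update s edge))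
  | _ => st  -- Python's edge[0]/edge[1] would raise here; unreachable: every generated edge has two entries

def parallelizeA (snet_lst : List (List (List Int))) : List (List (List Int)) :=
  (snet_lst.foldl (fun st edge_lst => edge_lst.foldl stepA st) ([[]], [PySem.Set.empty])).1

def generate_list_bitonic (length : Int) (make_parallel : Bool) : List (List (List Int)) :=
  if make_parallel then parallelizeA (sortA 0 length true [])
  else sortA 0 length true []

-- ===== PORT B =====

-- gp2: k = 1; while k > 0 and 2 * k < n: k = 2 * k; return k
def gp2AuxB (n k : Int) : Int :=
  if 0 < k ∧ 2 * k < n then gp2AuxB n (2 * k) else k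
termination_by (n - k).toNat
decreasing_by omega

def gp2B (n : Int) : Int := gp2AuxB n 1

theorem gp2AuxB_bounds (n : Int) :
    ∀ (k : Int), 0 < k → k < n → 1 ≤ gp2AuxB n k ∧ gp2AuxB n k < n := by
  intro k
  induction k using gp2AuxB.induct (n := n) with
  | case1 k h ih =>
    intro _ _
    rw [gp2AuxB, if_pos h]
    exact ih (by omega) (by omega)
  | case2 k h =>
    intro h0 h1
    rw [gp2AuxB, if_neg h]
    omega

theorem gp2B_bounds (n : Int) (h : 1 < n) : 1 ≤ gp2B n ∧ gp2B n < n :=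
  gp2AuxB_bounds n 1 one_pos h

-- merge_edges: returns the comparator list directly (m = gp2B n inlined)
def mergeB (lo n : Int) (dir : Bool) : List (List Int) :=
  if h : 1 < n then
    ((PySem.List.pyRange lo (lo + n - gp2B n)).map
        (fun i => if dir then [i, i + gp2B n] else [i + gp2B n, i]))
      ++ mergeB lo (gp2B n) dir ++ mergeB (lo + gp2B n) (n - gp2B n) dir
  else []
termination_by n.toNat
decreasing_by
  · have := gp2B_bounds n h; omega
  · have := gp2B_bounds n h; omega

-- sort_edges (m = n // 2 inlined)
def sortB (lo n : Int) (dir : Bool) : List (List Int) :=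
  if h : 1 < n then
    sortB lo (PySem.Int.floordiv n 2) (!dir)
      ++ sortB (lo + PySem.Int.floordiv n 2) (n - PySem.Int.floordiv n 2) dir
      ++ mergeB lo n dir
  else []
termination_by n.toNat
decreasing_by
  · rw [PySem.Int.floordiv_eq_ediv_of_pos (by omega)]; omega
  · rw [PySem.Int.floordiv_eq_ediv_of_pos (by omega)]; omega

-- the body of B's placement loop: stage index = max(last.get(a,-1), last.get(b,-1)) + 1
def stepB (st : List (List (List Int)) × PySem.Dict Int Int) (edge : List Int) :
    List (List (List Int)) × PySem.Dict Int Int :=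
  match edge with
  | [a, b] =>
    let p := max (st.2.getD a (-1)) (st.2.getD b (-1)) + 1
    (if p = (st.1.length : Int) then st.1 ++ [[edge]] else st.1.modify p.toNat (· ++ [edge]),
     (st.2.insert a p).insert b p)
  | _ => st  -- Python's 'a, b = edge' raises here; unreachable: every generated edge has two entries

def generate_list_bitonic_alt (length : Int) (make_parallel : Bool) : List (List (List Int)) :=
  if !make_parallel then (sortB 0 length true).map (fun e => [e])
  else ((sortB 0 length true).foldl stepB ([[]], PySem.Dict.empty)).1

-- ===== PRECONDITION & SPEC =====
def Spec_generate_list_bitonic (length : Int) (make_parallel : Bool) (out : List (List (List Int))) : Prop := out = generate_list_bitonic_alt length make_parallel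
instance (length : Int) (make_parallel : Bool) (out : List (List (List Int))) : Decidable (Spec_generate_list_bitonic length make_parallel out) := by unfold Spec_generate_list_bitonic; infer_instance

-- ===== CLAIM (what is proved, stated in full; the proofs are below) =====
def Claim_equal_generate_list_bitonic : Prop := ∀ (length : Int) (make_parallel : Bool), Dom_generate_list_bitonic length make_parallel → Spec_generate_list_bitonic length make_parallel (generate_list_bitonic length make_parallel)

-- ===== LEMMAS AND PROOFS =====

-- the two power-of-two helpers agree on the arguments they are called with
theorem gptAuxA_eq_gp2AuxB (n : Int) :
    ∀ (k : Int), 0 < k → k < n → gptAuxA n k = gp2AuxB n k := by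
  intro k
  induction k using gp2AuxB.induct (n := n) with
  | case1 k h ih =>
    intro _ _
    rw [gptAuxA, if_pos ⟨h.1, by omega⟩, gp2AuxB, if_pos h]
    exact ih (by omega) (by omega)
  | case2 k h =>
    intro h0 h1
    rw [gp2AuxB, if_neg h, gptAuxA, if_pos ⟨h0, h1⟩, gptAuxA, if_neg (by omega)]
    rw [PySem.Int.floordiv_eq_ediv_of_pos (by omega)]
    omega

theorem gptA_eq_gp2B (n : Int) (h : 1 < n) : gptA n = gp2B n :=
  gptAuxA_eq_gp2AuxB n 1 one_pos h

-- an append-per-element foldl is an append of a map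
theorem foldl_snoc_map {α : Type} (f : Int → α) :
    ∀ (l : List Int) (acc : List α),
      l.foldl (fun a i => a ++ [f i]) acc = acc ++ l.map f := by
  intro l
  induction l with
  | nil => simp
  | cons x xs ih => intro acc; simp [List.foldl, ih]

theorem mergeA_eq (dir : Bool) (lo n : Int) (acc : List (List (List Int))) :
    mergeA lo n dir acc = acc ++ (mergeB lo n dir).map (fun e => [e]) := by
  induction lo, n, acc using mergeA.induct (dir := dir) with
  | case1 lo n acc h ih1 ih2 =>
    rw [mergeA, dif_pos h, mergeB, dif_pos h]
    rw [← gptA_eq_gp2B n h]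
    simp only [dite_eq_ite] at ih1 ih2
    rw [ih2, ih1]
    rw [foldl_snoc_map (fun i => if dir then [[i, i + gptA n]] else [[i + gptA n, i]])]
    simp only [List.map_append, List.map_map, List.append_assoc]
    congr 2
    apply List.map_congr_left
    intro i _
    cases dir <;> simp
  | case2 lo n acc h => rw [mergeA, dif_neg h, mergeB, dif_neg h]; simp

theorem sortA_eq (dir : Bool) (lo n : Int) (acc : List (List (List Int))) :
    sortA lo n dir acc = acc ++ (sortB lo n dir).map (fun e => [e]) := by
  induction lo, n, dir, acc using sortA.induct with
  | case1 lo n dir acc h ih1 ih2 =>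
    rw [sortA, dif_pos h, sortB, dif_pos h]
    rw [mergeA_eq, ih2, ih1]
    simp [List.append_assoc]
  | case2 lo n dir acc h => rw [sortA, dif_neg h, sortB, dif_neg h]; simp

-- every edge B generates is a two-element list
theorem mergeB_shape (dir : Bool) (lo n : Int) :
    ∀ e ∈ mergeB lo n dir, ∃ a b : Int, e = [a, b] := by
  induction lo, n using mergeB.induct with
  | case1 lo n h ih1 ih2 =>
    rw [mergeB, dif_pos h]
    intro e he
    simp only [List.mem_append, List.mem_map] at he
    rcases he with (⟨i, _, rfl⟩ | h2) | h3
    · cases dir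
      · exact ⟨i + gp2B n, i, by simp⟩
      · exact ⟨i, i + gp2B n, by simp⟩
    · exact ih1 e h2
    · exact ih2 e h3
  | case2 lo n h => rw [mergeB, dif_neg h]; simp

theorem sortB_shape (dir : Bool) (lo n : Int) :
    ∀ e ∈ sortB lo n dir, ∃ a b : Int, e = [a, b] := by
  induction lo, n, dir using sortB.induct with
  | case1 lo n dir h ih1 ih2 =>
    rw [sortB, dif_pos h]
    intro e he
    simp only [List.mem_append] at he
    rcases he with (h1 | h2) | h3
    · exact ih1 e h1
    · exact ih2 e h2
    · exact mergeB_shape dir lo n e h3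
  | case2 lo n dir h => rw [sortB, dif_neg h]; simp

-- parallelize over singleton stages is a plain fold over the edges
theorem parallelizeA_map_singleton (l : List (List Int)) :
    parallelizeA (l.map (fun e => [e])) = (l.foldl stepA ([[]], [PySem.Set.empty])).1 := by
  unfold parallelizeA
  rw [List.foldl_map]
  rfl

-- index of the last stage set containing w, -1 if none (proof-side notion)
def lastIdx (sets : List (PySem.Set Int)) (w : Int) : Int :=
  match sets with
  | [] => -1
  | s :: t =>
    if 0 ≤ lastIdx t w then lastIdx t w + 1 else if w ∈ s then 0 else -1

theorem lastIdx_bounds (sets : List (PySem.Set Int)) (w : Int) :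
    -1 ≤ lastIdx sets w ∧ lastIdx sets w < sets.length := by
  induction sets with
  | nil => simp [lastIdx]
  | cons s t ih =>
    simp only [lastIdx, List.length_cons]
    split_ifs <;> refine ⟨by omega, by push_cast; omega⟩

theorem lastIdx_not_mem (sets : List (PySem.Set Int)) (w : Int) :
    ∀ (j : Nat), (hj : j < sets.length) → lastIdx sets w < j → w ∉ sets[j] := by
  induction sets with
  | nil => intro j hj; simp at hj
  | cons s t ih =>
    intro j hj hlt
    simp only [lastIdx] at hlt
    cases j with
    | zero =>
      by_cases h1 : 0 ≤ lastIdx t w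
      · rw [if_pos h1] at hlt
        exact absurd hlt (by omega)
      · rw [if_neg h1] at hlt
        by_cases h2 : w ∈ s
        · rw [if_pos h2] at hlt
          exact absurd hlt (by omega)
        · simpa using h2
    | succ j =>
      have ht := lastIdx_bounds t w
      have : lastIdx t w < j := by split_ifs at hlt <;> push_cast at hlt <;> omega
      simpa using ih j (by simpa using hj) this

theorem lastIdx_mem (sets : List (PySem.Set Int)) (w : Int) :
    ∀ (j : Nat), (hj : j < sets.length) → lastIdx sets w = j → w ∈ sets[j] := by
  induction sets with
  | nil => intro j hj; simp at hj
  | cons s t ih =>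
    intro j hj heq
    simp only [lastIdx] at heq
    cases j with
    | zero =>
      by_cases h1 : 0 ≤ lastIdx t w
      · rw [if_pos h1] at heq
        exact absurd heq (by omega)
      · rw [if_neg h1] at heq
        by_cases h2 : w ∈ s
        · simpa using h2
        · rw [if_neg h2] at heq
          exact absurd heq (by omega)
    | succ j =>
      have h1 : 0 ≤ lastIdx t w := by
        by_contra hc
        split_ifs at heq <;> push_cast at heq <;> omega
      rw [if_pos h1] at heq
      have : lastIdx t w = j := by push_cast at heq ⊢; omega
      simpa using ih j (by simpa using hj) this

-- characterization of the backward scan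
theorem scanGoA_spec (sets : List (PySem.Set Int)) (a b : Int) :
    ∀ (j : Nat), j ≤ sets.length → max (lastIdx sets a) (lastIdx sets b) < j →
    ∀ (p0 : Int) (pl0 : Bool),
      scanGoA sets a b ((PySem.List.pyRange 0 (j : Int)).reverse) (p0, pl0)
        = if (j : Int) = max (lastIdx sets a) (lastIdx sets b) + 1 then (p0, pl0)
          else (max (lastIdx sets a) (lastIdx sets b) + 1, true) := by
  intro j
  induction j with
  | zero =>
    intro _ hL p0 pl0
    have ha := lastIdx_bounds sets a
    have hb := lastIdx_bounds sets b
    simp only [Nat.cast_zero] at hL ⊢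
    rw [PySem.List.pyRange_one_eq_nil le_rfl]
    simp only [List.reverse_nil, scanGoA]
    rw [if_pos (by omega)]
  | succ j ih =>
    intro hj hL p0 pl0
    have hjr : ((j + 1 : Nat) : Int) = (j : Int) + 1 := by push_cast; ring
    rw [hjr, PySem.List.pyRange_one_succ_right (by positivity), List.reverse_append]
    simp only [List.reverse_singleton, List.singleton_append]
    rw [scanGoA]
    have hjlt : j < sets.length := by omega
    have hget : PySem.List.pyGetD sets (j : Int) PySem.Set.empty = sets[j] := by
      rw [PySem.List.pyGetD_eq_getElem sets PySem.Set.empty (by positivity) (by exact_mod_cast hjlt)]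
      simp
    rw [hget]
    by_cases hcase : max (lastIdx sets a) (lastIdx sets b) = (j : Int)
    · -- a or b occurs in sets[j]: break immediately, state unchanged
      have hcond : (!(PySem.Set.contains sets[j] a) && !(PySem.Set.contains sets[j] b)) = false := by
        rcases max_choice (lastIdx sets a) (lastIdx sets b) with hm | hm
        · have ha : a ∈ sets[j] := lastIdx_mem sets a j hjlt (by omega)
          simp only [Bool.and_eq_false_iff, Bool.not_eq_false']
          left; simpa using ha
        · have hb : b ∈ sets[j] := lastIdx_mem sets b j hjlt (by omega)
          simp only [Bool.and_eq_false_iff, Bool.not_eq_false']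
          right; simpa using hb
      rw [hcond]
      simp only [Bool.false_eq_true, if_false]
      rw [if_pos (by omega)]
    · -- neither occurs in sets[j]: take this stage and continue downward
      have hna : a ∉ sets[j] := lastIdx_not_mem sets a j hjlt (by omega)
      have hnb : b ∉ sets[j] := lastIdx_not_mem sets b j hjlt (by omega)
      have hcond : (!(PySem.Set.contains sets[j] a) && !(PySem.Set.contains sets[j] b)) = true := by
        simp only [Bool.and_eq_true, Bool.not_eq_true']
        exact ⟨by simpa using hna, by simpa using hnb⟩
      rw [hcond]
      simp only [if_true]
      rw [ih (by omega) (by omega) (j : Int) true]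
      rw [if_neg (show ¬((j : Int) + 1 = max (lastIdx sets a) (lastIdx sets b) + 1) by omega)]
      split_ifs with h
      · rw [Prod.mk.injEq]; exact ⟨h, rfl⟩
      · rfl

-- lastIdx after appending a fresh stage set
theorem lastIdx_append_singleton (sets : List (PySem.Set Int)) (s : PySem.Set Int) (w : Int) :
    lastIdx (sets ++ [s]) w = if w ∈ s then (sets.length : Int) else lastIdx sets w := by
  induction sets with
  | nil => simp [lastIdx]
  | cons s' t ih =>
    simp only [List.cons_append, lastIdx, ih, List.length_cons]
    have ht := lastIdx_bounds t w
    split_ifs <;> push_cast <;> omega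

-- lastIdx after adding a and b to the stage set at index j
theorem lastIdx_modify_update (a b : Int) :
    ∀ (sets : List (PySem.Set Int)) (j : Nat), j < sets.length → ∀ (w : Int),
      lastIdx (sets.modify j (fun s => PySem.Set.update s [a, b])) w
        = if w = a ∨ w = b then max (lastIdx sets w) (j : Int) else lastIdx sets w := by
  intro sets
  induction sets with
  | nil => intro j hj; simp at hj
  | cons s t ih =>
    intro j hj w
    have ht := lastIdx_bounds t w
    have hm : w ∈ PySem.Set.update s [a, b] ↔ w ∈ s ∨ (w = a ∨ w = b) := by
      rw [PySem.Set.mem_update]; simp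
    cases j with
    | zero =>
      have hmod : (s :: t).modify 0 (fun s => PySem.Set.update s [a, b])
          = PySem.Set.update s [a, b] :: t := by simp
      rw [hmod]
      simp only [lastIdx, hm]
      by_cases hab : w = a ∨ w = b
      · simp only [hab, or_true, if_pos trivial, if_true]
        split_ifs <;> push_cast <;> omega
      · simp only [hab, or_false, if_false]
    | succ j =>
      have hjt : j < t.length := by simpa using hj
      have hmod : (s :: t).modify (j + 1) (fun s => PySem.Set.update s [a, b])
          = s :: t.modify j (fun s => PySem.Set.update s [a, b]) := by simp
      rw [hmod]
      simp only [lastIdx, ih j hjt w]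
      by_cases hab : w = a ∨ w = b
      · simp only [hab, if_true]
        have htm := lastIdx_bounds (t.modify j (fun s => PySem.Set.update s [a, b])) w
        split_ifs <;> push_cast <;> omega
      · simp only [hab, if_false]

-- the invariant between A's parallelize state and B's
def InvPar (st : List (List (List Int)) × List (PySem.Set Int))
    (tt : List (List (List Int)) × PySem.Dict Int Int) : Prop :=
  st.1 = tt.1 ∧ st.2.length = st.1.length ∧ st.2 ≠ [] ∧
  ∀ w : Int, lastIdx st.2 w = tt.2.getD w (-1)

theorem stepA_stepB (st : List (List (List Int)) × List (PySem.Set Int))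
    (tt : List (List (List Int)) × PySem.Dict Int Int) (h : InvPar st tt) (a b : Int) :
    InvPar (stepA st [a, b]) (stepB tt [a, b]) := by
  obtain ⟨stage, sets⟩ := st
  obtain ⟨stages, last⟩ := tt
  obtain ⟨h1, h2, h3, h4⟩ := h
  simp only at h1 h2 h3 h4
  subst h1
  have hba := lastIdx_bounds sets a
  have hbb := lastIdx_bounds sets b
  have hk : 0 < sets.length := List.length_pos_iff.mpr h3
  have hpa : last.getD a (-1) = lastIdx sets a := (h4 a).symm
  have hpb : last.getD b (-1) = lastIdx sets b := (h4 b).symm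
  have hlen : (stage.length : Int) = (sets.length : Int) := by exact_mod_cast congrArg Nat.cast h2.symm
  have hscan := scanGoA_spec sets a b sets.length le_rfl (by omega) ((sets.length : Int) - 1) false
  simp only [stepA, stepB]
  rw [hlen, hscan, hpa, hpb]
  by_cases hce : (sets.length : Int) = max (lastIdx sets a) (lastIdx sets b) + 1
  · -- new stage appended on both sides
    rw [if_pos hce]
    dsimp only
    simp only [Bool.not_false, if_true]
    rw [if_pos (by omega)]
    refine ⟨rfl, by simp [h2], by simp, ?_⟩
    intro w
    rw [lastIdx_append_singleton, PySem.Dict.getD_insert, PySem.Dict.getD_insert]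
    have hmem : w ∈ PySem.Set.ofList [a, b] ↔ w = a ∨ w = b := by
      rw [PySem.Set.mem_ofList]; simp
    rw [← h4 w]
    split_ifs with h5 h6 h7 <;> rw [hmem] at h5 <;>
      first
        | (subst h6; omega)
        | (subst h7; omega)
        | omega
  · -- placed into existing stage max(last[a], last[b]) + 1 on both sides
    rw [if_neg hce]
    dsimp only
    simp only [Bool.not_true, Bool.false_eq_true, if_false]
    rw [if_neg (show ¬(max (lastIdx sets a) (lastIdx sets b) + 1 = (sets.length : Int))
      from fun hc => hce hc.symm)]
    have hL0 : 0 ≤ max (lastIdx sets a) (lastIdx sets b) + 1 := by omega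
    have hLlt : (max (lastIdx sets a) (lastIdx sets b) + 1).toNat < sets.length := by omega
    refine ⟨rfl, by simp [h2], ?_, ?_⟩
    · apply List.ne_nil_of_length_pos
      simpa using hk
    · intro w
      rw [lastIdx_modify_update a b sets _ hLlt w, PySem.Dict.getD_insert,
        PySem.Dict.getD_insert]
      have hcast : (((max (lastIdx sets a) (lastIdx sets b) + 1).toNat : Nat) : Int)
          = max (lastIdx sets a) (lastIdx sets b) + 1 := by omega
      rw [hcast, ← h4 w]
      split_ifs with h5 h6 h7 <;>
        first
          | (subst h6; omega)
          | (subst h7; omega)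
          | omega

theorem foldl_inv (edges : List (List Int))
    (hshape : ∀ e ∈ edges, ∃ a b : Int, e = [a, b]) :
    ∀ st tt, InvPar st tt → InvPar (edges.foldl stepA st) (edges.foldl stepB tt) := by
  induction edges with
  | nil => intro st tt h; simpa using h
  | cons e es ih =>
    intro st tt h
    obtain ⟨a, b, rfl⟩ := hshape e (by simp)
    exact ih (fun e' he' => hshape e' (by simp [he'])) _ _ (stepA_stepB st tt h a b)

theorem init_inv : InvPar ([[]], [PySem.Set.empty]) ([[]], PySem.Dict.empty) := by
  refine ⟨rfl, rfl, by simp, ?_⟩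
  intro w
  simp [lastIdx, PySem.Set.empty, PySem.Dict.getD, PySem.Dict.empty, PySem.Dict.get?]

-- ===== VERDICT (by name: the statement is the Claim_ definition above) =====
theorem generate_list_bitonic_spec : Claim_equal_generate_list_bitonic := by
  intro length mp _
  unfold Spec_generate_list_bitonic generate_list_bitonic generate_list_bitonic_alt
  have hedges : sortA 0 length true [] = (sortB 0 length true).map (fun e => [e]) := by
    simpa using sortA_eq true 0 length []
  cases mp with
  | false => simpa using hedges
  | true =>
    simp only [Bool.not_true, Bool.false_eq_true, if_false, if_true]
    rw [hedges, parallelizeA_map_singleton]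
    exact (foldl_inv (sortB 0 length true) (sortB_shape true 0 length)
      ([[]], [PySem.Set.empty]) ([[]], PySem.Dict.empty) init_inv).1
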